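-- pv_equiv track=rewrite | github.com/beammedown/AdventofCode | 2024/day5/pt2.py | rulecheck
-- ===== SOURCE A (Python) =====
-- def rulecheck(rule_key: str, rule_vals: list[str], l: list[str]) -> bool:
--     try:
--         rule_ind = l.index(rule_key)
--     except:
--         return True
--     for val in rule_vals:
--         try:
--             if rule_ind > l.index(val):
--                 return False
--         except:
--             pass
--     return True
-- ===== SOURCE B (Python) =====
-- def rulecheck(rule_key: str, rule_vals: list[str], l: list[str]) -> bool:
--     vals = set(rule_vals)
--     saw_val = False
--     for x in l:
--         if x == rule_key:
--             return not saw_val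
--         if x in vals:
--             saw_val = True
--     return True
-- ===== Notes on version B (the rewrite author's own statement) =====
-- stated objective: alternative
-- what changed: Single left-to-right pass over l with a saw_val flag and a set of rule_vals, short-circuiting at the first occurrence of rule_key, instead of calling l.index once per rule value.
import Mathlib
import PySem

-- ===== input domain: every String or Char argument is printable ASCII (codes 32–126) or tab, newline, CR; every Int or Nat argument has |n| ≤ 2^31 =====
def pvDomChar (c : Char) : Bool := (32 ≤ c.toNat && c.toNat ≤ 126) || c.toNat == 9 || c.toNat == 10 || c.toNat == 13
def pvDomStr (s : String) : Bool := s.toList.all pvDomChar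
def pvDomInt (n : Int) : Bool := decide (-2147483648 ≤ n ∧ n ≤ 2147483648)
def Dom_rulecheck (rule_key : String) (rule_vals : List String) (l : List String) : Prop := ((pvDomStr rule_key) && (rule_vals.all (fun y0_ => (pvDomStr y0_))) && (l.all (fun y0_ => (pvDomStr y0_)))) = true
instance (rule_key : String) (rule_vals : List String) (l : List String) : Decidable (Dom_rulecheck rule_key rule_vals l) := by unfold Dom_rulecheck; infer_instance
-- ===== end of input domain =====

-- B replaces A's per-value l.index scans by one left-to-right pass over l with a saw_val flag (objective: alternative traversal shape).

-- ===== PORT A =====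
-- the for-loop over rule_vals: 'if rule_ind > l.index(val): return False' (a missing val is skipped)
def rulecheckLoopA (rule_ind : Nat) (l : List String) : List String → Bool
  | [] => true
  | val :: rest =>
    match PySem.List.index? l val with
    | some j => if j < rule_ind then false else rulecheckLoopA rule_ind l rest
    | none => rulecheckLoopA rule_ind l rest

def rulecheck (rule_key : String) (rule_vals : List String) (l : List String) : Bool :=
  match PySem.List.index? l rule_key with
  | none => true
  | some rule_ind => rulecheckLoopA rule_ind l rule_vals

-- ===== PORT B =====
-- the single pass over l, carrying saw_val
def rulecheckAltLoop (rule_key : String) (vals : PySem.Set String) : List String → Bool → Bool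
  | [], _ => true
  | x :: rest, saw_val =>
    if x = rule_key then !saw_val
    else rulecheckAltLoop rule_key vals rest (saw_val || PySem.Set.contains vals x)

def rulecheck_alt (rule_key : String) (rule_vals : List String) (l : List String) : Bool :=
  rulecheckAltLoop rule_key (PySem.Set.ofList rule_vals) l false

-- ===== PRECONDITION & SPEC =====
def Spec_rulecheck (rule_key : String) (rule_vals : List String) (l : List String) (out : Bool) : Prop := out = rulecheck_alt rule_key rule_vals l
instance (rule_key : String) (rule_vals : List String) (l : List String) (out : Bool) : Decidable (Spec_rulecheck rule_key rule_vals l out) := by unfold Spec_rulecheck; infer_instance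

-- ===== CLAIM (what is proved, stated in full; the proofs are below) =====
def Claim_equal_rulecheck : Prop := ∀ (rule_key : String) (rule_vals : List String) (l : List String), Dom_rulecheck rule_key rule_vals l → Spec_rulecheck rule_key rule_vals l (rulecheck rule_key rule_vals l)

-- ===== LEMMAS AND PROOFS =====

-- A's loop returns false iff some rule value first occurs strictly before rule_ind
theorem loopA_eq (rule_ind : Nat) (l : List String) (vals : List String) :
    rulecheckLoopA rule_ind l vals =
      !decide (∃ v ∈ vals, ∃ j, PySem.List.index? l v = some j ∧ j < rule_ind) := by
  induction vals with
  | nil => simp [rulecheckLoopA]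
  | cons v rest ih =>
    simp only [rulecheckLoopA]
    cases h : PySem.List.index? l v with
    | none =>
      rw [ih]
      have hiff : (∃ w ∈ rest, ∃ k, PySem.List.index? l w = some k ∧ k < rule_ind) ↔
          (∃ w ∈ v :: rest, ∃ k, PySem.List.index? l w = some k ∧ k < rule_ind) := by
        constructor
        · rintro ⟨w, hw, k, hk, hkr⟩
          exact ⟨w, List.mem_cons_of_mem _ hw, k, hk, hkr⟩
        · rintro ⟨w, hw, k, hk, hkr⟩
          rcases List.mem_cons.mp hw with rfl | hw'
          · rw [h] at hk; cases hk
          · exact ⟨w, hw', k, hk, hkr⟩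
      simp only [hiff]
    | some j =>
      show (if j < rule_ind then false else rulecheckLoopA rule_ind l rest) = _
      by_cases hj : j < rule_ind
      · rw [if_pos hj]
        have hex : ∃ w ∈ v :: rest, ∃ k, PySem.List.index? l w = some k ∧ k < rule_ind :=
          ⟨v, List.mem_cons_self, j, h, hj⟩
        rw [decide_eq_true hex]
        rfl
      · rw [if_neg hj, ih]
        have hiff : (∃ w ∈ rest, ∃ k, PySem.List.index? l w = some k ∧ k < rule_ind) ↔
            (∃ w ∈ v :: rest, ∃ k, PySem.List.index? l w = some k ∧ k < rule_ind) := by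
          constructor
          · rintro ⟨w, hw, k, hk, hkr⟩
            exact ⟨w, List.mem_cons_of_mem _ hw, k, hk, hkr⟩
          · rintro ⟨w, hw, k, hk, hkr⟩
            rcases List.mem_cons.mp hw with rfl | hw'
            · rw [h] at hk; cases hk; exact absurd hkr hj
            · exact ⟨w, hw', k, hk, hkr⟩
        simp only [hiff]

theorem index?_lt_iff_mem_take (l : List String) (v : String) (n : Nat) :
    (∃ j, PySem.List.index? l v = some j ∧ j < n) ↔ v ∈ l.take n := by
  constructor
  · rintro ⟨j, hj, hjn⟩
    obtain ⟨hk, hv, _⟩ := PySem.List.getElem_of_index?_eq_some hj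
    rw [← hv]
    exact List.mem_take_iff_getElem.mpr ⟨j, by omega, rfl⟩
  · intro hv
    obtain ⟨j, hj, hget⟩ := List.mem_take_iff_getElem.mp hv
    have hmem : v ∈ l := hget ▸ List.getElem_mem _
    obtain ⟨k, hk⟩ := Option.isSome_iff_exists.mp
      ((PySem.List.index?_isSome_iff l v).mpr hmem)
    obtain ⟨hkl, hkv, hmin⟩ := PySem.List.getElem_of_index?_eq_some hk
    refine ⟨k, hk, ?_⟩
    by_contra hkn
    exact hmin j (by omega) hget

-- B's loop characterized by the first occurrence of rule_key in the remaining list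
theorem loopB_eq (rule_key : String) (vals : PySem.Set String) (l : List String) (saw : Bool) :
    rulecheckAltLoop rule_key vals l saw =
      match PySem.List.index? l rule_key with
      | none => true
      | some n => !(saw || decide (∃ x ∈ l.take n, PySem.Set.contains vals x = true)) := by
  induction l generalizing saw with
  | nil => simp [rulecheckAltLoop, PySem.List.index?]
  | cons x rest ih =>
    simp only [rulecheckAltLoop]
    by_cases hx : x = rule_key
    · subst hx
      rw [PySem.List.index?_cons_self]
      simp
    · have hne : x ≠ rule_key := hx
      rw [if_neg hx, PySem.List.index?_cons_of_ne rest hne, ih]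
      cases h : PySem.List.index? rest rule_key with
      | none => rfl
      | some n =>
        simp only [Option.map_some]
        congr 1
        simp only [List.take_succ_cons, List.mem_cons, Bool.or_assoc]
        congr 1
        cases hc : PySem.Set.contains vals x with
        | false =>
          have hiff : (∃ y ∈ x :: rest.take n, PySem.Set.contains vals y = true) ↔
              (∃ y ∈ rest.take n, PySem.Set.contains vals y = true) := by
            constructor
            · rintro ⟨y, hy, hyc⟩
              rcases List.mem_cons.mp hy with rfl | hy'
              · rw [hc] at hyc; cases hyc
              · exact ⟨y, hy', hyc⟩
            · rintro ⟨y, hy, hyc⟩; exact ⟨y, List.mem_cons_of_mem _ hy, hyc⟩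
          simp only [hiff, Bool.false_or]
        | true =>
          simp
          exact Or.inl ((PySem.Set.contains_iff _ _).mp hc)

-- ===== VERDICT (by name: the statement is the Claim_ definition above) =====
theorem rulecheck_spec : Claim_equal_rulecheck := by
  intro rule_key rule_vals l _
  unfold Spec_rulecheck rulecheck rulecheck_alt
  rw [loopB_eq]
  cases h : PySem.List.index? l rule_key with
  | none => rfl
  | some n =>
    simp only [loopA_eq, Bool.false_or]
    congr 1
    simp only [decide_eq_decide]
    constructor
    · rintro ⟨v, hv, hj⟩
      refine ⟨v, (index?_lt_iff_mem_take l v n).mp hj, ?_⟩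
      rw [PySem.Set.contains_iff]
      exact (PySem.Set.mem_ofList rule_vals v).mpr hv
    · rintro ⟨x, hx, hxc⟩
      have hxv : x ∈ rule_vals :=
        (PySem.Set.mem_ofList rule_vals x).mp ((PySem.Set.contains_iff _ _).mp hxc)
      exact ⟨x, hxv, (index?_lt_iff_mem_take l x n).mpr hx⟩
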